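-- pv_equiv track=rewrite | github.com/sike26/PFA-TransportTrack | App/project/libraries/graphLib/graphe_tbc.py | breakdown_affected_stops
-- ===== SOURCE A (Python) =====
-- def breakdown_affected_stops(dict_, stop_1, stop_2):
--     affected_stops = set()
--     affected_stops.add(stop_1)
--     for key, list_ in dict_.items():
--         if (stop_1 in list_) & (stop_2 in list_):
--             index_1 = list_.index(stop_1)
--             index_2 = list_.index(stop_2)
--             for index, elt in enumerate(list_):
--                 if ((index < index_2) & (index > index_1) | (index < index_1) & (index > index_2)):
--                     affected_stops.add(elt)
--     affected_stops.add(stop_2)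
--     return affected_stops
-- ===== SOURCE B (Python) =====
-- def breakdown_affected_stops(dict_, stop_1, stop_2):
--     affected_stops = {stop_1}
--     for list_ in dict_.values():
--         target = None
--         buffer = None
--         for elt in list_:
--             if target is None:
--                 if elt == stop_1 or elt == stop_2:
--                     if elt == stop_1 and elt == stop_2:
--                         break
--                     target = stop_2 if elt == stop_1 else stop_1
--                     buffer = []
--             elif elt == target:
--                 affected_stops.update(buffer)
--                 break
--             else:
--                 buffer.append(elt)
--     affected_stops.add(stop_2)
--     return affected_stops
-- ===== Notes on version B (the rewrite author's own statement) =====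
-- stated objective: alternative
-- what changed: B scans each route once with a two-state scanner (seek either endpoint, then buffer elements until the other endpoint's first occurrence, committing the buffer only when it is found), eliminating A's two membership tests, two .index passes and the full enumerate-with-index-bounds filter.
import Mathlib
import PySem

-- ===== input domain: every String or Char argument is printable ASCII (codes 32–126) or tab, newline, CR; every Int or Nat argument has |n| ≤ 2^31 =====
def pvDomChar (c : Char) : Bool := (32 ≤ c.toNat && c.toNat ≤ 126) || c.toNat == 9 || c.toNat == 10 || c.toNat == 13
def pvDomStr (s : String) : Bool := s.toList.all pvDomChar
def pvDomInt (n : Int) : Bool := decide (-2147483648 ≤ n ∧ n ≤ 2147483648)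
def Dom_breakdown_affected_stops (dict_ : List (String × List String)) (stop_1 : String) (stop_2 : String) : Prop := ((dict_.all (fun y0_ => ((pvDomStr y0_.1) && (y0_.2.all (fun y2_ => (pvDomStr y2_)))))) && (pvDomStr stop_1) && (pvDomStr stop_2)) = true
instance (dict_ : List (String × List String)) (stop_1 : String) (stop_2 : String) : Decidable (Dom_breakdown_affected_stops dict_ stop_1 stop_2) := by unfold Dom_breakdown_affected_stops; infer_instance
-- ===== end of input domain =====

-- B replaces A's per-list membership tests + two .index passes + full enumerate filter with a
-- single forward pass per list: a two-state scanner that, after seeing either endpoint, buffers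
-- elements and commits the buffer only when it reaches the other endpoint; same result set.

-- ===== PORT A =====
-- literal port of A: per matching list, enumerate the whole list and add the elements whose
-- index lies strictly between the two .index positions; the result set is a PySem.Set.
-- '.index' is guarded by the membership test, so '(index? …).getD 0' is exact here.
def breakdown_affected_stops (dict_ : List (String × List String)) (stop_1 : String) (stop_2 : String) : List String :=
  let affected_stops : PySem.Set String := PySem.Set.add PySem.Set.empty stop_1
  let affected_stops := dict_.foldl (fun acc kv =>
    let list_ := kv.2
    if list_.contains stop_1 && list_.contains stop_2 then
      let index_1 := (PySem.List.index? list_ stop_1).getD 0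
      let index_2 := (PySem.List.index? list_ stop_2).getD 0
      (PySem.List.enumerate list_).foldl (fun acc2 p =>
        if (p.1 < (index_2 : Int) ∧ (index_1 : Int) < p.1) ∨ (p.1 < (index_1 : Int) ∧ (index_2 : Int) < p.1)
        then PySem.Set.add acc2 p.2 else acc2) acc
    else acc) affected_stops
  PySem.Set.add affected_stops stop_2

-- ===== PORT B =====
-- the inner 'for elt in list_' loop of Source B: the state is 'none' before either endpoint is
-- seen, and 'some (target, buffer)' afterwards; 'break' returns the accumulator.
def pvScanB (stop_1 stop_2 : String) (acc : PySem.Set String) :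
    List String → Option (String × List String) → PySem.Set String
  | [], _ => acc
  | elt :: rest, none =>
      if elt = stop_1 ∨ elt = stop_2 then
        if elt = stop_1 ∧ elt = stop_2 then acc
        else pvScanB stop_1 stop_2 acc rest (some (if elt = stop_1 then stop_2 else stop_1, []))
      else pvScanB stop_1 stop_2 acc rest none
  | elt :: rest, some (target, buffer) =>
      if elt = target then PySem.Set.update acc buffer
      else pvScanB stop_1 stop_2 acc rest (some (target, buffer ++ [elt]))

def breakdown_affected_stops_alt (dict_ : List (String × List String)) (stop_1 : String) (stop_2 : String) : List String :=
  let affected_stops : PySem.Set String := PySem.Set.add PySem.Set.empty stop_1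
  let affected_stops := dict_.foldl (fun acc kv => pvScanB stop_1 stop_2 acc kv.2 none) affected_stops
  PySem.Set.add affected_stops stop_2

-- ===== PRECONDITION & SPEC =====
def Spec_breakdown_affected_stops (dict_ : List (String × List String)) (stop_1 : String) (stop_2 : String) (out : List String) : Prop := out = breakdown_affected_stops_alt dict_ stop_1 stop_2
instance (dict_ : List (String × List String)) (stop_1 : String) (stop_2 : String) (out : List String) : Decidable (Spec_breakdown_affected_stops dict_ stop_1 stop_2 out) := by unfold Spec_breakdown_affected_stops; infer_instance

-- ===== CLAIM (what is proved, stated in full; the proofs are below) =====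
def Claim_equal_breakdown_affected_stops : Prop := ∀ (dict_ : List (String × List String)) (stop_1 : String) (stop_2 : String), Dom_breakdown_affected_stops dict_ stop_1 stop_2 → Spec_breakdown_affected_stops dict_ stop_1 stop_2 (breakdown_affected_stops dict_ stop_1 stop_2)

-- ===== LEMMAS AND PROOFS =====

-- the segment strictly between the first occurrences of s1 and s2, when both are present
def pvMidSeg (s1 s2 : String) : List String → Option (List String)
  | [] => none
  | x :: rest =>
      if x = s1 ∧ x = s2 then some []
      else if x = s1 then (if rest.contains s2 then some (rest.takeWhile (fun y => y ≠ s2)) else none)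
      else if x = s2 then (if rest.contains s1 then some (rest.takeWhile (fun y => y ≠ s1)) else none)
      else pvMidSeg s1 s2 rest

-- phase 1 of the scanner: it commits buffer ++ (prefix before target) iff target occurs
theorem pvScanB_some (s1 s2 t : String) (acc : PySem.Set String) :
    ∀ (l buffer : List String),
    pvScanB s1 s2 acc l (some (t, buffer))
      = if l.contains t then PySem.Set.update acc (buffer ++ l.takeWhile (fun y => y ≠ t)) else acc := by
  intro l
  induction l with
  | nil => intro buffer; simp [pvScanB]
  | cons x rest ih =>
    intro buffer
    by_cases hx : x = t
    · subst hx; simp [pvScanB, List.takeWhile]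
    · simp only [pvScanB, if_neg hx, ih, List.contains_cons, List.takeWhile]
      have ht : ¬ t = x := fun h => hx h.symm
      simp [hx, ht, List.append_assoc]

-- phase 0 of the scanner, characterised by pvMidSeg
theorem pvScanB_none (s1 s2 : String) (acc : PySem.Set String) :
    ∀ l : List String,
    pvScanB s1 s2 acc l none
      = match pvMidSeg s1 s2 l with
        | some m => PySem.Set.update acc m
        | none => acc := by
  intro l
  induction l with
  | nil => simp [pvScanB, pvMidSeg]
  | cons x rest ih =>
    by_cases h12 : x = s1 ∧ x = s2
    · have hs : s1 = s2 := h12.1.symm.trans h12.2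
      simp [pvScanB, pvMidSeg, h12.1, hs, PySem.Set.update]
    · by_cases h1 : x = s1
      · have h2 : ¬ x = s2 := fun h => h12 ⟨h1, h⟩
        simp only [pvScanB, pvMidSeg, if_pos (Or.inl h1), if_neg h12, if_pos h1,
          pvScanB_some s1 s2 s2 acc rest []]
        split_ifs with hc <;> simp
      · by_cases h2 : x = s2
        · simp only [pvScanB, pvMidSeg, if_pos (Or.inr h2), if_neg h12, if_neg h1, if_pos h2,
            pvScanB_some s1 s2 s1 acc rest []]
          split_ifs with hc <;> simp
        · simp only [pvScanB, pvMidSeg, if_neg h1, if_neg h2,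
            if_neg (show ¬ (x = s1 ∨ x = s2) from fun h => h.elim h1 h2), if_neg h12, ih]

-- if one of the endpoints is missing, pvMidSeg finds nothing
theorem pvMidSeg_none (s1 s2 : String) :
    ∀ l : List String, ¬ (l.contains s1 = true ∧ l.contains s2 = true) → pvMidSeg s1 s2 l = none := by
  intro l
  induction l with
  | nil => intro _; rfl
  | cons x rest ih =>
    intro h
    by_cases h12 : x = s1 ∧ x = s2
    · exact absurd ⟨by simp [h12.1], by simp [h12.2]⟩ h
    · by_cases h1 : x = s1
      · have h2 : ¬ x = s2 := fun h' => h12 ⟨h1, h'⟩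
        have hc2 : rest.contains s2 = false := by
          by_contra hc
          exact h ⟨by simp [h1], by simp [List.contains_cons]; simp at hc; exact Or.inr hc⟩
        have hm2 : s2 ∉ rest := by simpa using hc2
        have hne : ¬ s1 = s2 := fun h' => h2 (h1.trans h')
        simp [pvMidSeg, h12, h1, h2, hne, hm2]
      · by_cases h2 : x = s2
        · have hc1 : rest.contains s1 = false := by
            by_contra hc
            exact h ⟨by simp [List.contains_cons]; simp at hc; exact Or.inr hc, by simp [h2]⟩
          have hm1 : s1 ∉ rest := by simpa using hc1
          have hne : ¬ s2 = s1 := fun h' => h1 (h2.trans h')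
          simp [pvMidSeg, h12, h1, h2, hne, hm1]
        · have : ¬ (rest.contains s1 = true ∧ rest.contains s2 = true) := by
            intro ⟨a, b⟩
            exact h ⟨by simp only [List.contains_cons, Bool.or_eq_true]; exact Or.inr a,
              by simp only [List.contains_cons, Bool.or_eq_true]; exact Or.inr b⟩
          simp [pvMidSeg, h12, h1, h2, ih this]

-- the prefix before the first occurrence of t is take (first index of t)
theorem pv_takeWhile_eq_take (t : String) :
    ∀ l : List String, l.contains t = true →
      l.takeWhile (fun y => y ≠ t) = l.take ((PySem.List.index? l t).getD 0) := by
  intro l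
  induction l with
  | nil => intro h; simp at h
  | cons x rest ih =>
    intro h
    by_cases hx : x = t
    · subst hx
      rw [PySem.List.index?_cons_self]
      simp [List.takeWhile]
    · have hr : rest.contains t = true := by
        simp only [List.contains_cons, Bool.or_eq_true, beq_iff_eq] at h
        rcases h with h' | h'
        · exact absurd h'.symm hx
        · simpa using h'
      rw [PySem.List.index?_cons_of_ne rest hx]
      have hs : (PySem.List.index? rest t).isSome := by
        rw [PySem.List.index?_isSome_iff]; simpa using hr
      obtain ⟨k, hk⟩ := Option.isSome_iff_exists.mp hs
      have hrec := ih hr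
      rw [hk] at hrec
      rw [hk]
      simp only [Option.map_some, Option.getD_some, List.take_succ_cons, List.takeWhile]
      simp only [Option.getD_some] at hrec
      simp only [ne_eq, decide_not] at hrec
      simp [hx, hrec]

-- a membership step down a cons cell
theorem pv_contains_tail (x v : String) (rest : List String) (h : (x :: rest).contains v = true)
    (hx : ¬ x = v) : rest.contains v = true := by
  simp only [List.contains_cons, Bool.or_eq_true, beq_iff_eq] at h
  rcases h with h' | h'
  · exact absurd h'.symm hx
  · simpa using h'

-- when both endpoints are present, pvMidSeg is the drop/take segment between the indices
theorem pvMidSeg_some (s1 s2 : String) :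
    ∀ l : List String, l.contains s1 = true → l.contains s2 = true →
      pvMidSeg s1 s2 l
        = some ((l.drop (min ((PySem.List.index? l s1).getD 0) ((PySem.List.index? l s2).getD 0) + 1)).take
            (max ((PySem.List.index? l s1).getD 0) ((PySem.List.index? l s2).getD 0)
              - (min ((PySem.List.index? l s1).getD 0) ((PySem.List.index? l s2).getD 0) + 1))) := by
  intro l
  induction l with
  | nil => intro h; simp at h
  | cons x rest ih =>
    intro hc1 hc2
    by_cases h12 : x = s1 ∧ x = s2
    · obtain ⟨e1, e2⟩ := h12
      subst e1
      rw [show s2 = x from e2.symm] at *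
      rw [PySem.List.index?_cons_self]
      simp [pvMidSeg]
    · by_cases h1 : x = s1
      · have h2 : ¬ x = s2 := fun h' => h12 ⟨h1, h'⟩
        have hr2 : rest.contains s2 = true := pv_contains_tail x s2 rest hc2 h2
        subst h1
        rw [PySem.List.index?_cons_self, PySem.List.index?_cons_of_ne rest h2]
        have hs : (PySem.List.index? rest s2).isSome := by
          rw [PySem.List.index?_isSome_iff]; simpa using hr2
        obtain ⟨k, hk⟩ := Option.isSome_iff_exists.mp hs
        rw [hk]
        have htw := pv_takeWhile_eq_take s2 rest hr2
        rw [hk] at htw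
        simp only [Option.getD_some, ne_eq, decide_not] at htw
        simp [pvMidSeg, h12, h2, hr2, htw]
        simpa using hr2
      · by_cases h2 : x = s2
        · have hr1 : rest.contains s1 = true := pv_contains_tail x s1 rest hc1 h1
          subst h2
          rw [PySem.List.index?_cons_self, PySem.List.index?_cons_of_ne rest h1]
          have hs : (PySem.List.index? rest s1).isSome := by
            rw [PySem.List.index?_isSome_iff]; simpa using hr1
          obtain ⟨k, hk⟩ := Option.isSome_iff_exists.mp hs
          rw [hk]
          have htw := pv_takeWhile_eq_take s1 rest hr1
          rw [hk] at htw
          simp only [Option.getD_some, ne_eq, decide_not] at htw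
          simp [pvMidSeg, h12, h1, hr1, htw]
          simpa using hr1
        · have hr1 : rest.contains s1 = true := pv_contains_tail x s1 rest hc1 h1
          have hr2 : rest.contains s2 = true := pv_contains_tail x s2 rest hc2 h2
          rw [PySem.List.index?_cons_of_ne rest h1, PySem.List.index?_cons_of_ne rest h2]
          have hs1 : (PySem.List.index? rest s1).isSome := by
            rw [PySem.List.index?_isSome_iff]; simpa using hr1
          have hs2 : (PySem.List.index? rest s2).isSome := by
            rw [PySem.List.index?_isSome_iff]; simpa using hr2
          obtain ⟨k1, hk1⟩ := Option.isSome_iff_exists.mp hs1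
          obtain ⟨k2, hk2⟩ := Option.isSome_iff_exists.mp hs2
          rw [hk1, hk2]
          have hrec := ih hr1 hr2
          rw [hk1, hk2] at hrec
          simp only [Option.getD_some] at hrec
          simp only [pvMidSeg, if_neg h12, if_neg h1, if_neg h2, hrec,
            Option.map_some, Option.getD_some, Option.some.injEq]
          congr 1
          · omega
          · rw [show min (k1 + 1) (k2 + 1) + 1 = (min k1 k2 + 1) + 1 by omega,
              List.drop_succ_cons]

-- folding "if cond then add" equals folding add over the filtered projection
theorem pv_foldl_if_add (xs : List (Int × String)) (cond : Int × String → Prop) [DecidablePred cond]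
    (acc : PySem.Set String) :
    xs.foldl (fun a p => if cond p then PySem.Set.add a p.2 else a) acc
      = ((xs.filter (fun p => decide (cond p))).map Prod.snd).foldl PySem.Set.add acc := by
  induction xs generalizing acc with
  | nil => rfl
  | cons x xs ih =>
    simp only [List.foldl_cons, List.filter_cons]
    by_cases h : cond x
    · simp [h, ih]
    · simp [h, ih]

-- the elements of l whose index (counting from s) lies strictly between lo and hi
-- are exactly the segment (drop (lo+1-s)).take (hi - max s (lo+1)), in order
theorem pv_enum_filter (l : List String) (lo hi : Nat) :
    ∀ s : Nat,
    ((PySem.List.enumerate l (s : Int)).filter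
        (fun p => decide ((lo : Int) < p.1 ∧ p.1 < (hi : Int)))).map Prod.snd
      = (l.drop (lo + 1 - s)).take (hi - max s (lo + 1)) := by
  induction l with
  | nil => intro s; simp [PySem.List.enumerate_nil]
  | cons x xs ih =>
    intro s
    rw [PySem.List.enumerate_cons, List.filter_cons]
    by_cases h : (lo : Int) < (s : Int) ∧ (s : Int) < (hi : Int)
    · have hs0 : lo + 1 - s = 0 := by omega
      have hm : hi - max s (lo + 1) = (hi - max (s + 1) (lo + 1)) + 1 := by omega
      rw [decide_eq_true h, if_pos rfl, List.map_cons, hs0, List.drop_zero, hm,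
        List.take_succ_cons]
      have := ih (s + 1)
      rw [show lo + 1 - (s + 1) = 0 by omega, List.drop_zero] at this
      rw [show ((s : Int) + 1) = ((s + 1 : Nat) : Int) by push_cast; ring, this]
    · rw [decide_eq_false h, if_neg (by simp)]
      have := ih (s + 1)
      rw [show ((s : Int) + 1) = ((s + 1 : Nat) : Int) by push_cast; ring]
      rw [this]
      rcases Nat.lt_or_ge lo s with hls | hls
      · have hhi : hi ≤ s := by omega
        have : hi - max s (lo + 1) = 0 := by omega
        have h2 : hi - max (s + 1) (lo + 1) = 0 := by omega
        simp [this]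
        omega
      · have hd : lo + 1 - s = (lo + 1 - (s + 1)) + 1 := by omega
        have hm : hi - max s (lo + 1) = hi - max (s + 1) (lo + 1) := by omega
        rw [hd, List.drop_succ_cons, hm]

-- A's per-list body, as update with the drop/take segment between the two indices
theorem pv_bodyA (list_ : List String) (i1 i2 : Nat) (acc : PySem.Set String) :
    (PySem.List.enumerate list_).foldl (fun acc2 p =>
        if (p.1 < (i2 : Int) ∧ (i1 : Int) < p.1) ∨ (p.1 < (i1 : Int) ∧ (i2 : Int) < p.1)
        then PySem.Set.add acc2 p.2 else acc2) acc
      = PySem.Set.update acc ((list_.drop (min i1 i2 + 1)).take (max i1 i2 - (min i1 i2 + 1))) := by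
  have hfun : (fun (acc2 : PySem.Set String) (p : Int × String) =>
      if (p.1 < (i2 : Int) ∧ (i1 : Int) < p.1) ∨ (p.1 < (i1 : Int) ∧ (i2 : Int) < p.1)
      then PySem.Set.add acc2 p.2 else acc2)
      = (fun acc2 p => if ((min i1 i2 : Nat) : Int) < p.1 ∧ p.1 < ((max i1 i2 : Nat) : Int)
          then PySem.Set.add acc2 p.2 else acc2) := by
    funext acc2 p
    refine if_congr ?_ rfl rfl
    omega
  rw [hfun, PySem.Set.update,
    pv_foldl_if_add (PySem.List.enumerate list_)
      (fun p => ((min i1 i2 : Nat) : Int) < p.1 ∧ p.1 < ((max i1 i2 : Nat) : Int)) acc]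
  have h0 := pv_enum_filter list_ (min i1 i2) (max i1 i2) 0
  simp only [Nat.cast_zero, Nat.sub_zero, Nat.zero_max] at h0
  rw [h0]

-- the per-list bodies of A and B agree for every accumulator
theorem pv_body_eq (s1 s2 : String) (list_ : List String) (acc : PySem.Set String) :
    (if list_.contains s1 && list_.contains s2 then
      let index_1 := (PySem.List.index? list_ s1).getD 0
      let index_2 := (PySem.List.index? list_ s2).getD 0
      (PySem.List.enumerate list_).foldl (fun acc2 p =>
        if (p.1 < (index_2 : Int) ∧ (index_1 : Int) < p.1) ∨ (p.1 < (index_1 : Int) ∧ (index_2 : Int) < p.1)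
        then PySem.Set.add acc2 p.2 else acc2) acc
    else acc)
    = pvScanB s1 s2 acc list_ none := by
  rw [pvScanB_none]
  by_cases h : (list_.contains s1 && list_.contains s2) = true
  · have ⟨h1, h2⟩ := Bool.and_eq_true_iff.mp h
    rw [if_pos h, pvMidSeg_some s1 s2 list_ h1 h2]
    exact pv_bodyA list_ _ _ acc
  · have hn : ¬ (list_.contains s1 = true ∧ list_.contains s2 = true) := by
      intro ⟨a, b⟩; exact h (by rw [a, b]; rfl)
    rw [if_neg h, pvMidSeg_none s1 s2 list_ hn]

-- ===== VERDICT (by name: the statement is the Claim_ definition above) =====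
theorem breakdown_affected_stops_spec : Claim_equal_breakdown_affected_stops := by
  intro dict_ stop_1 stop_2 _
  unfold Spec_breakdown_affected_stops breakdown_affected_stops breakdown_affected_stops_alt
  refine congrArg (fun s => PySem.Set.add s stop_2) ?_
  refine PySem.List.foldl_congr_mem dict_ _ _ _ ?_
  intro acc kv _
  exact pv_body_eq stop_1 stop_2 kv.2 acc
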